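-- pv_equiv track=rewrite | github.com/paiml/depyler | examples/hard_edge_nested_loops.py | nested_skip_pattern
-- ===== SOURCE A (Python) =====
-- def nested_skip_pattern(n: int) -> int:
--     """Count iterations with skip pattern in nested loops."""
--     count: int = 0
--     i: int = 0
--     while i < n:
--         j: int = 0
--         while j < n:
--             if (i + j) % 3 == 0:
--                 j = j + 1
--                 continue
--             if i * j > n * n // 2:
--                 break
--             count = count + 1
--             j = j + 1
--         i = i + 1
--     return count
-- ===== SOURCE B (Python) =====
-- def nested_skip_pattern(n: int) -> int:
--     """Count iterations with skip pattern in nested loops (per-row closed form)."""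
--     t = n * n // 2
--     total = 0
--     for i in range(n):
--         e = n if i == 0 else min(t // i + 1, n)
--         total += e - ((i + e + 2) // 3 - (i + 2) // 3)
--     return total
-- ===== Notes on version B (the rewrite author's own statement) =====
-- stated objective: faster
-- what changed: Replaces the O(n^2) nested while loops by a single O(n) pass: each row's contribution is computed in closed form (break threshold t//i+1 from i*j>n*n//2, minus an arithmetic count of the skipped (i+j)%3==0 indices).
import Mathlib
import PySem

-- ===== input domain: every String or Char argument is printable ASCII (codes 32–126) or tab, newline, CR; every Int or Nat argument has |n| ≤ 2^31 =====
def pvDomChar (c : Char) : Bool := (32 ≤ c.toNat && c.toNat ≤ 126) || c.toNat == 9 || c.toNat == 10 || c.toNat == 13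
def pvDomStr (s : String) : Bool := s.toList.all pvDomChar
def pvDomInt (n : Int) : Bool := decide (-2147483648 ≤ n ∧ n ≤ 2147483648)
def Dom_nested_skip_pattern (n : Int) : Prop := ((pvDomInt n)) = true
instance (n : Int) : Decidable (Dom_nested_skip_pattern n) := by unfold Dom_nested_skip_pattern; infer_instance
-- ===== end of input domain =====

-- B replaces A's O(n^2) nested loops by one O(n) pass with a per-row closed form (faster, asymptotically).

-- ===== PORT A =====
-- inner while loop: j, count threaded exactly as in A
def nestedInnerA (n i j count : Int) : Int :=
  if _h : j < n then
    if PySem.Int.mod (i + j) 3 = 0 then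
      nestedInnerA n i (j + 1) count
    else if i * j > PySem.Int.floordiv (n * n) 2 then
      count
    else
      nestedInnerA n i (j + 1) (count + 1)
  else
    count
termination_by (n - j).toNat
decreasing_by all_goals omega

-- outer while loop
def nestedOuterA (n i count : Int) : Int :=
  if _h : i < n then
    nestedOuterA n (i + 1) (nestedInnerA n i 0 count)
  else
    count
termination_by (n - i).toNat
decreasing_by omega

def nested_skip_pattern (n : Int) : Int := nestedOuterA n 0 0

-- ===== PORT B =====
def nested_skip_pattern_alt (n : Int) : Int :=
  let t := PySem.Int.floordiv (n * n) 2
  (PySem.List.pyRange 0 n 1).foldl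
    (fun total i =>
      let e := if i = 0 then n else min (PySem.Int.floordiv t i + 1) n
      total + (e - (PySem.Int.floordiv (i + e + 2) 3 - PySem.Int.floordiv (i + 2) 3))) 0

-- ===== PRECONDITION & SPEC =====
def Spec_nested_skip_pattern (n : Int) (out : Int) : Prop := out = nested_skip_pattern_alt n
instance (n : Int) (out : Int) : Decidable (Spec_nested_skip_pattern n out) := by unfold Spec_nested_skip_pattern; infer_instance

-- ===== CLAIM (what is proved, stated in full; the proofs are below) =====
def Claim_equal_nested_skip_pattern : Prop := ∀ (n : Int), Dom_nested_skip_pattern n → Spec_nested_skip_pattern n (nested_skip_pattern n)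

-- ===== LEMMAS AND PROOFS =====

-- row-end threshold: first column where a non-skipped iteration would break (capped at n)
def rowEnd (n i : Int) : Int :=
  if i = 0 then n
  else min (PySem.Int.floordiv (PySem.Int.floordiv (n * n) 2) i + 1) n

-- number of non-skipped columns in [j, rowEnd), as A's inner loop counts them
def rowCount (i e j : Int) : Int :=
  if _h : j < e then
    (if PySem.Int.mod (i + j) 3 = 0 then 0 else 1) + rowCount i e (j + 1)
  else 0
termination_by (e - j).toNat
decreasing_by omega

theorem rowCount_closed (i e : Int) : ∀ j : Int, j ≤ e →
    rowCount i e j =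
      (e - j) - (PySem.Int.floordiv (i + e + 2) 3 - PySem.Int.floordiv (i + j + 2) 3) := by
  intro j hj
  induction hn : (e - j).toNat using Nat.strong_induction_on generalizing j with
  | _ m ih =>
    rw [rowCount]
    simp only [PySem.Int.floordiv_eq_ediv_of_pos (show (0:Int) < 3 by omega),
               PySem.Int.mod_eq_emod_of_pos (show (0:Int) < 3 by omega)]
    by_cases h : j < e
    · rw [dif_pos h,
          ih (e - (j+1)).toNat (by omega) (j+1) (by omega) rfl]
      simp only [PySem.Int.floordiv_eq_ediv_of_pos (show (0:Int) < 3 by omega)]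
      split_ifs with hm <;> omega
    · rw [dif_neg h]; omega

theorem rowCount_of_ge (i e j : Int) (h : e ≤ j) : rowCount i e j = 0 := by
  rw [rowCount]; rw [dif_neg (by omega)]

theorem T_nonneg (n : Int) : 0 ≤ PySem.Int.floordiv (n * n) 2 := by
  rw [PySem.Int.floordiv_eq_ediv_of_pos (show (0:Int) < 2 by omega)]
  exact Int.ediv_nonneg (mul_self_nonneg n) (by omega)

theorem rowEnd_le (n i : Int) : rowEnd n i ≤ n := by
  unfold rowEnd; split_ifs <;> omega

-- break test characterisation for i ≥ 1
theorem break_iff (n i j : Int) (hi : 0 < i) :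
    PySem.Int.floordiv (n * n) 2 < i * j ↔
      PySem.Int.floordiv (PySem.Int.floordiv (n * n) 2) i < j := by
  rw [PySem.Int.floordiv_lt_iff_lt_mul hi, mul_comm j i]

theorem inner_eq_rowCount (n i : Int) (hi : 0 ≤ i) :
    ∀ (j c : Int), 0 ≤ j → nestedInnerA n i j c = c + rowCount i (rowEnd n i) j := by
  intro j c hj
  induction hm : (n - j).toNat using Nat.strong_induction_on generalizing j c with
  | _ m ih =>
    rw [nestedInnerA]
    by_cases h : j < n
    · rw [dif_pos h]
      by_cases hs : PySem.Int.mod (i + j) 3 = 0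
      · rw [if_pos hs, ih (n - (j+1)).toNat (by omega) (j+1) c (by omega) rfl]
        congr 1
        rcases lt_or_ge j (rowEnd n i) with he | he
        · conv_rhs => rw [rowCount]
          rw [dif_pos he, if_pos hs, zero_add]
        · rw [rowCount_of_ge _ _ _ (by omega), rowCount_of_ge _ _ _ he]
      · rw [if_neg hs]
        by_cases hb : i * j > PySem.Int.floordiv (n * n) 2
        · rw [if_pos hb]
          -- break: j is at or past rowEnd
          have hi1 : 0 < i := by
            rcases lt_or_eq_of_le hi with h1 | h1
            · exact h1
            · exfalso
              rw [← h1, zero_mul] at hb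
              exact absurd (T_nonneg n) (by omega)
          have hbr := (break_iff n i j hi1).mp hb
          have he : rowEnd n i ≤ j := by
            unfold rowEnd; rw [if_neg (by omega)]; omega
          rw [rowCount_of_ge _ _ _ he]
          omega
        · rw [if_neg hb, ih (n - (j+1)).toNat (by omega) (j+1) (c+1) (by omega) rfl]
          have he : j < rowEnd n i := by
            unfold rowEnd
            by_cases hz : i = 0
            · rw [if_pos hz]; exact h
            · rw [if_neg hz]
              have hi1 : 0 < i := by omega
              have hnb : ¬ PySem.Int.floordiv (PySem.Int.floordiv (n * n) 2) i < j :=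
                fun hc => hb ((break_iff n i j hi1).mpr hc)
              omega
          conv_rhs => rw [rowCount]
          rw [dif_pos he, if_neg hs]
          omega
    · rw [dif_neg h,
          rowCount_of_ge _ _ _ (by have := rowEnd_le n i; omega)]
      omega

-- per-row term as B computes it
def rowTerm (n i : Int) : Int :=
  rowEnd n i - (PySem.Int.floordiv (i + rowEnd n i + 2) 3 - PySem.Int.floordiv (i + 2) 3)

theorem rowEnd_nonneg (n i : Int) (hi : 0 ≤ i) (hin : i < n) : 0 ≤ rowEnd n i := by
  unfold rowEnd
  split_ifs with hz
  · omega
  · have hT := T_nonneg n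
    have : 0 ≤ PySem.Int.floordiv (PySem.Int.floordiv (n * n) 2) i := by
      rw [PySem.Int.floordiv_eq_ediv_of_pos (show (0:Int) < i by omega)]
      exact Int.ediv_nonneg hT (by omega)
    omega

theorem inner_row (n i c : Int) (hi : 0 ≤ i) (hin : i < n) :
    nestedInnerA n i 0 c = c + rowTerm n i := by
  rw [inner_eq_rowCount n i hi 0 c le_rfl,
      rowCount_closed i (rowEnd n i) 0 (rowEnd_nonneg n i hi hin)]
  unfold rowTerm
  norm_num

theorem outer_eq (n : Int) : ∀ (i c : Int), 0 ≤ i →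
    nestedOuterA n i c = c + ((PySem.List.pyRange i n 1).map (rowTerm n)).sum := by
  intro i c hi
  induction hm : (n - i).toNat using Nat.strong_induction_on generalizing i c with
  | _ m ih =>
    rw [nestedOuterA]
    by_cases h : i < n
    · rw [dif_pos h,
          ih (n - (i+1)).toNat (by omega) (i+1) _ (by omega) rfl,
          inner_row n i c hi h,
          PySem.List.pyRange_one_cons h, List.map_cons, List.sum_cons]
      ring
    · rw [dif_neg h, PySem.List.pyRange_one_eq_nil (by omega)]
      simp

-- ===== VERDICT (by name: the statement is the Claim_ definition above) =====
theorem nested_skip_pattern_spec : Claim_equal_nested_skip_pattern := by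
  intro n _
  unfold Spec_nested_skip_pattern nested_skip_pattern nested_skip_pattern_alt
  rw [outer_eq n 0 0 le_rfl,
      PySem.List.foldl_add (PySem.List.pyRange 0 n 1)]
  simp only [zero_add]
  rfl
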